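-- pv_equiv track=rewrite | github.com/josongsong/semantica-codegraph | src/common/utils.py | build_batch_values_clause
-- ===== SOURCE A (Python) =====
-- def build_batch_values_clause(num_fields: int, row_count: int, start_index: int = 1) -> str:
--     """
--     PostgreSQL 배치 INSERT를 위한 VALUES 절 생성.
--
--     4곳에서 중복되던 placeholder 생성 로직을 통합.
--
--     Args:
--         num_fields: 필드 수
--         row_count: 행 수
--         start_index: 시작 placeholder 번호 (기본: 1)
--
--     Returns:
--         VALUES 절 문자열 (예: "($1, $2, $3), ($4, $5, $6)")
--
--     Example:
--         >>> build_batch_values_clause(3, 2)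
--         '($1, $2, $3), ($4, $5, $6)'
--
--         >>> build_batch_values_clause(2, 3, start_index=5)
--         '($5, $6), ($7, $8), ($9, $10)'
--     """
--     placeholders = []
--     current = start_index
--
--     for _ in range(row_count):
--         row_placeholders = ", ".join(f"${i}" for i in range(current, current + num_fields))
--         placeholders.append(f"({row_placeholders})")
--         current += num_fields
--
--     return ", ".join(placeholders)
-- ===== SOURCE B (Python) =====
-- def build_batch_values_clause(num_fields: int, row_count: int, start_index: int = 1) -> str:
--     nums = [f"${i}" for i in range(start_index, start_index + num_fields * max(row_count, 0))]
--     rows = []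
--     for r in range(row_count):
--         chunk = nums[r * num_fields:(r + 1) * num_fields]
--         rows.append("(" + ", ".join(chunk) + ")")
--     return ", ".join(rows)
-- ===== Notes on version B (the rewrite author's own statement) =====
-- stated objective: alternative
-- what changed: B precomputes one flat list of all placeholder tokens for the whole batch and carves each row out of it by list slicing, replacing A's stateful loop that tracks a running counter and regenerates a range per row.
import Mathlib
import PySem

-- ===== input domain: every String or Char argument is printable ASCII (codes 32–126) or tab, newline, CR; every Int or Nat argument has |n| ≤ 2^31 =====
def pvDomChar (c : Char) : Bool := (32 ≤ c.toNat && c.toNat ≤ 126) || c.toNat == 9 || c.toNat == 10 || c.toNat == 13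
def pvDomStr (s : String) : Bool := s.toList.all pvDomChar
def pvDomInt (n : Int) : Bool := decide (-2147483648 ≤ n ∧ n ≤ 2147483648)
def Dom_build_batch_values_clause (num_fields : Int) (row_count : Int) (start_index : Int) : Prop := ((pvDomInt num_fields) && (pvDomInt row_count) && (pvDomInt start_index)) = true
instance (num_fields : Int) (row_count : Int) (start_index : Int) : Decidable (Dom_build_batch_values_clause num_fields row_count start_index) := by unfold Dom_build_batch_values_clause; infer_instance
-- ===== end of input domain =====

-- B builds one flat list of all placeholder tokens and slices it into rows, instead of A's
-- stateful per-row counter loop; same cost, different decomposition (objective: alternative).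

-- ===== PORT A =====
def build_batch_values_clause (num_fields : Int) (row_count : Int) (start_index : Int) : String :=
  let st := (PySem.List.pyRange 0 row_count 1).foldl
    (fun (acc : List String × Int) _ =>
      let row_placeholders := PySem.Str.join ", "
        ((PySem.List.pyRange acc.2 (acc.2 + num_fields) 1).map (fun i => "$" ++ PySem.Int.toStr i))
      (acc.1 ++ ["(" ++ row_placeholders ++ ")"], acc.2 + num_fields))
    ([], start_index)
  PySem.Str.join ", " st.1

-- ===== PORT B =====
def build_batch_values_clause_alt (num_fields : Int) (row_count : Int) (start_index : Int) : String :=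
  let nums := (PySem.List.pyRange start_index (start_index + num_fields * max row_count 0) 1).map
    (fun i => "$" ++ PySem.Int.toStr i)
  let rows := (PySem.List.pyRange 0 row_count 1).foldl
    (fun (acc : List String) r =>
      acc ++ ["(" ++ PySem.Str.join ", "
        (PySem.List.slice nums (some (r * num_fields)) (some ((r + 1) * num_fields))) ++ ")"])
    []
  PySem.Str.join ", " rows

-- ===== PRECONDITION & SPEC =====
def Spec_build_batch_values_clause (num_fields : Int) (row_count : Int) (start_index : Int) (out : String) : Prop := out = build_batch_values_clause_alt num_fields row_count start_index
instance (num_fields : Int) (row_count : Int) (start_index : Int) (out : String) : Decidable (Spec_build_batch_values_clause num_fields row_count start_index out) := by unfold Spec_build_batch_values_clause; infer_instance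

-- ===== CLAIM (what is proved, stated in full; the proofs are below) =====
def Claim_equal_build_batch_values_clause : Prop := ∀ (num_fields : Int) (row_count : Int) (start_index : Int), Dom_build_batch_values_clause num_fields row_count start_index → Spec_build_batch_values_clause num_fields row_count start_index (build_batch_values_clause num_fields row_count start_index)

-- ===== LEMMAS AND PROOFS =====

/-- the token `$i`. -/
def pvTok (i : Int) : String := "$" ++ PySem.Int.toStr i

/-- the string for one row starting at placeholder `c`. -/
def pvRow (nf c : Int) : String :=
  "(" ++ PySem.Str.join ", " ((PySem.List.pyRange c (c + nf) 1).map pvTok) ++ ")"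

/-- A's loop, fully characterised. -/
theorem pvAfold (nf : Int) (l : List Int) (acc : List String) (cur : Int) :
    l.foldl (fun (a : List String × Int) _ =>
        (a.1 ++ ["(" ++ PySem.Str.join ", "
          ((PySem.List.pyRange a.2 (a.2 + nf) 1).map (fun i => "$" ++ PySem.Int.toStr i)) ++ ")"],
         a.2 + nf)) (acc, cur)
      = (acc ++ (List.range l.length).map (fun j : Nat => pvRow nf (cur + (j : Int) * nf)),
         cur + (l.length : Int) * nf) := by
  induction l generalizing acc cur with
  | nil => simp
  | cons x t ih =>
    simp only [List.foldl_cons, ih, List.length_cons, Prod.mk.injEq]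
    refine ⟨?_, by push_cast; ring⟩
    rw [List.append_assoc, List.range_succ_eq_map, List.map_cons, List.map_map]
    have hhead : pvRow nf (cur + ((0 : Nat) : Int) * nf)
        = "(" ++ PySem.Str.join ", "
            ((PySem.List.pyRange cur (cur + nf) 1).map (fun i => "$" ++ PySem.Int.toStr i)) ++ ")" := by
      simp only [pvRow, Nat.cast_zero, zero_mul, add_zero]
      rfl
    have htail : List.map (fun j : Nat => pvRow nf (cur + nf + (j : Int) * nf)) (List.range t.length)
        = List.map ((fun j : Nat => pvRow nf (cur + (j : Int) * nf)) ∘ Nat.succ) (List.range t.length) := by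
      apply List.map_congr_left
      intro j _
      simp only [Function.comp]
      have h : cur + nf + (j : Int) * nf = cur + (((j : Nat) + 1 : Nat) : Int) * nf := by push_cast; ring
      rw [h]
    rw [← hhead, htail]
    rfl

/-- slicing the flat token list gives exactly row `k`'s tokens. -/
theorem pvSlice (nf rc si : Int) (k : Nat) (hk : (k : Int) < rc) :
    PySem.List.slice ((PySem.List.pyRange si (si + nf * rc) 1).map pvTok)
        (some ((k : Int) * nf)) (some (((k : Int) + 1) * nf))
      = (PySem.List.pyRange (si + (k : Int) * nf) (si + (k : Int) * nf + nf) 1).map pvTok := by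
  by_cases hnf : nf ≤ 0
  · have hrc : (0 : Int) ≤ rc := le_trans (Int.natCast_nonneg k) (le_of_lt hk)
    rw [PySem.List.pyRange_one_eq_nil (a := si) (b := si + nf * rc) (by nlinarith),
        PySem.List.pyRange_one_eq_nil (by omega)]
    simp [PySem.List.slice]
  · rw [not_le] at hnf
    have h0 : (0 : Int) ≤ (k : Int) * nf := by positivity
    have h1 : (0 : Int) ≤ ((k : Int) + 1) * nf := by positivity
    have hsplit1 : PySem.List.pyRange si (si + nf * rc) 1
        = PySem.List.pyRange si (si + (k : Int) * nf) 1
          ++ PySem.List.pyRange (si + (k : Int) * nf) (si + nf * rc) 1 :=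
      PySem.List.pyRange_one_append _ _ _ (by omega) (by nlinarith)
    have hsplit2 : PySem.List.pyRange (si + (k : Int) * nf) (si + nf * rc) 1
        = PySem.List.pyRange (si + (k : Int) * nf) (si + (k : Int) * nf + nf) 1
          ++ PySem.List.pyRange (si + (k : Int) * nf + nf) (si + nf * rc) 1 :=
      PySem.List.pyRange_one_append _ _ _ (by omega) (by nlinarith)
    have hlen1 : ((PySem.List.pyRange si (si + (k : Int) * nf) 1).map pvTok).length
        = ((k : Int) * nf).toNat := by
      rw [List.length_map, PySem.List.length_pyRange_one]; congr 1; omega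
    have hlen2 : ((PySem.List.pyRange (si + (k : Int) * nf) (si + (k : Int) * nf + nf) 1).map pvTok).length
        = nf.toNat := by
      rw [List.length_map, PySem.List.length_pyRange_one]; congr 1; omega
    have htake : (((k : Int) + 1) * nf).toNat - ((k : Int) * nf).toNat = nf.toNat := by
      have : ((k : Int) + 1) * nf = (k : Int) * nf + nf := by ring
      omega
    rw [PySem.List.slice_toNat _ h0 h1, htake, hsplit1, List.map_append,
        List.drop_left' hlen1, hsplit2, List.map_append, List.take_left' hlen2]

-- ===== VERDICT (by name: the statement is the Claim_ definition above) =====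
theorem build_batch_values_clause_spec : Claim_equal_build_batch_values_clause := by
  intro nf rc si _
  unfold Spec_build_batch_values_clause build_batch_values_clause build_batch_values_clause_alt
  simp only
  rw [pvAfold, PySem.List.foldl_append_singleton_eq_map, List.nil_append, List.nil_append]
  congr 1
  rw [PySem.List.length_pyRange_one, PySem.List.pyRange_one 0 rc, List.map_map]
  simp only [sub_zero]
  by_cases hrc : 0 < rc
  · rw [max_eq_left hrc.le]
    apply List.map_congr_left
    intro k hk
    simp only [List.mem_range] at hk
    have hkrc : (k : Int) < rc := by omega
    simp only [Function.comp, zero_add]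
    rw [show (fun i => "$" ++ PySem.Int.toStr i) = pvTok from rfl, pvSlice nf rc si k hkrc]
    rfl
  · have h0 : rc.toNat = 0 := by omega
    simp [h0]
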